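-- pv_equiv track=rewrite | github.com/CLSInfra-UNED/CLS-Augur | Augur/utils.py | count_common_elements
-- ===== SOURCE A (Python) =====
-- def count_common_elements(list_of_sets):
--     num_sets = len(list_of_sets)
--     common_elements_count = [0] * num_sets
--
--     for i in range(num_sets):
--         for j in range(num_sets):
--             if i != j:  # Skip comparing the set with itself
--                 common_elements_count[i] = max([common_elements_count[i],len(
--                     list_of_sets[i].intersection(list_of_sets[j]))])
--     return common_elements_count
-- ===== SOURCE B (Python) =====
-- def _row_best(i, s, list_of_sets):
--     # tally, per other set j, how many elements of s it contains; return the best tally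
--     cnt = [0] * len(list_of_sets)
--     for x in s:
--         for j, t in enumerate(list_of_sets):
--             if j != i and x in t:
--                 cnt[j] += 1
--     return max(cnt, default=0)
--
--
-- def count_common_elements(list_of_sets):
--     return [_row_best(i, s, list_of_sets) for i, s in enumerate(list_of_sets)]
-- ===== Notes on version B (the rewrite author's own statement) =====
-- stated objective: alternative
-- what changed: A computes, for every ordered pair (i,j), the size of the set intersection and folds a running max per row; B never computes an intersection: it inverts the loops, tallying for each element of set i which other sets contain it into a per-row count array, and returns the maximum tally of the row.
import Mathlib
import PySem

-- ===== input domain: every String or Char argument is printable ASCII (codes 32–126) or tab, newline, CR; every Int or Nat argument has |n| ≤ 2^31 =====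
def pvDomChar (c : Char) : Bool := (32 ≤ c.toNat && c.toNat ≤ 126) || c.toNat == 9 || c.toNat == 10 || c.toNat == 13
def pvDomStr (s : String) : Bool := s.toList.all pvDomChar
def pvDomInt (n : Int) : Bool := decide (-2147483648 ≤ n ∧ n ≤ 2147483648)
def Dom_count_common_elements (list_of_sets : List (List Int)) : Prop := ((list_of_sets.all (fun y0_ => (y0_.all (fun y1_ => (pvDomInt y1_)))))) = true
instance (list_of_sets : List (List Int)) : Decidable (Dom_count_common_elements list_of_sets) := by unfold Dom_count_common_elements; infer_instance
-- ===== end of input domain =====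

-- B replaces A's per-pair set intersections by a per-row element tally (inverted loops: for each
-- element of row i, count which other sets contain it; the row answer is the maximum tally).
-- Objective: alternative decomposition, same asymptotic cost.
-- The inner lists model Python sets; B consumes them only order-independently.

-- ===== PORT A =====
def count_common_elements (list_of_sets : List (List Int)) : List Int :=
  let num_sets : Int := list_of_sets.length
  (PySem.List.pyRange 0 num_sets 1).foldl (fun res i =>
    (PySem.List.pyRange 0 num_sets 1).foldl (fun res j =>
      if i ≠ j then
        PySem.List.pySetD res i (max (PySem.List.pyGetD res i 0)
          (PySem.Set.len (PySem.Set.inter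
            (PySem.Set.ofList (PySem.List.pyGetD list_of_sets i []))
            (PySem.List.pyGetD list_of_sets j []))))
      else res) res)
    (List.replicate list_of_sets.length 0)

-- ===== PORT B =====
-- helper _row_best of Source B (iterating the set s is order-independent: cnt is a pure tally)
def rowBest (i : Int) (s : List Int) (list_of_sets : List (List Int)) : Int :=
  let cnt := (PySem.Set.ofList s).foldl (fun cnt x =>
      (PySem.List.enumerate list_of_sets).foldl (fun cnt jt =>
        if jt.1 ≠ i ∧ PySem.Set.contains jt.2 x then
          PySem.List.pySetD cnt jt.1 (PySem.List.pyGetD cnt jt.1 0 + 1)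
        else cnt) cnt) (List.replicate list_of_sets.length 0)
  (PySem.List.max? cnt (fun y => y)).getD 0

def count_common_elements_alt (list_of_sets : List (List Int)) : List Int :=
  (PySem.List.enumerate list_of_sets).map (fun p => rowBest p.1 p.2 list_of_sets)

-- ===== PRECONDITION & SPEC =====
def Spec_count_common_elements (list_of_sets : List (List Int)) (out : List Int) : Prop := out = count_common_elements_alt list_of_sets
instance (list_of_sets : List (List Int)) (out : List Int) : Decidable (Spec_count_common_elements list_of_sets out) := by unfold Spec_count_common_elements; infer_instance

-- ===== CLAIM (what is proved, stated in full; the proofs are below) =====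
def Claim_equal_count_common_elements : Prop := ∀ (list_of_sets : List (List Int)), Dom_count_common_elements list_of_sets → Spec_count_common_elements list_of_sets (count_common_elements list_of_sets)

-- ===== LEMMAS AND PROOFS =====

-- the common specification: per row i, the maximum over j ≠ i of |set(sets[i]) ∩ sets[j]|
def glen (sets : List (List Int)) (i j : Nat) : Int :=
  PySem.Set.len (PySem.Set.inter (PySem.Set.ofList (sets.getD i [])) (sets.getD j []))

def gval (sets : List (List Int)) (i j : Nat) : Int := if i ≠ j then glen sets i j else 0

def rowSpec (sets : List (List Int)) (i : Nat) : Int :=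
  ((List.range sets.length).map (gval sets i)).foldl max 0

theorem innerB_getD (i x : Int) (l : List (List Int)) :
    ∀ (o : Nat) (cnt : List Int), o + l.length ≤ cnt.length →
    ∀ k : Nat,
    ((PySem.List.enumerate l (o : Int)).foldl (fun cnt jt =>
        if jt.1 ≠ i ∧ PySem.Set.contains jt.2 x then
          PySem.List.pySetD cnt jt.1 (PySem.List.pyGetD cnt jt.1 0 + 1)
        else cnt) cnt).getD k 0
      = cnt.getD k 0 +
        (if o ≤ k ∧ k < o + l.length ∧ (k : Int) ≠ i ∧ (l.getD (k - o) []).contains x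
         then 1 else 0) := by
  induction l with
  | nil => intro o cnt _ k; simp [PySem.List.enumerate]
  | cons t l ih =>
    intro o cnt hlen k
    simp only [List.length_cons] at hlen
    rw [PySem.List.enumerate_cons]
    simp only [List.foldl_cons]
    have hcast : ((o : Int) + 1) = (((o + 1 : Nat)) : Int) := by push_cast; ring
    rw [hcast]
    have harith : ∀ Q : Prop, [Decidable Q] →
        (if o + 1 ≤ k ∧ k < o + 1 + l.length ∧ Q then (1:Int) else 0)
        = (if k ≠ o ∧ (o ≤ k ∧ k < o + (t :: l).length ∧ Q) then 1 else 0) := by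
      intro Q _
      by_cases hq : Q
      · simp only [List.length_cons]
        by_cases hk : k = o
        · subst hk; rw [if_neg (by omega), if_neg (by tauto)]
        · by_cases hkl : o + 1 ≤ k ∧ k < o + 1 + l.length
          · rw [if_pos ⟨hkl.1, by omega, hq⟩, if_pos ⟨hk, by omega, by omega, hq⟩]
          · rw [if_neg (by tauto), if_neg (by rintro ⟨h1,h2,h3,_⟩; exact hkl ⟨by omega, by omega⟩)]
      · rw [if_neg (by tauto), if_neg (by tauto)]
    by_cases hc : ((o : Int) ≠ i ∧ PySem.Set.contains t x)
    · rw [if_pos hc]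
      rw [ih (o+1) _ (by rw [PySem.List.length_pySetD]; omega) k]
      rw [PySem.List.pySetD_natCast, PySem.List.pyGetD_natCast]
      rcases hc with ⟨hne, hmem⟩
      by_cases hk : k = o
      · subst hk
        rw [List.getD_eq_getElem?_getD, List.getElem?_set_self (by omega), Option.getD_some,
            List.getD_eq_getElem?_getD]
        have h1 : (if k ≤ k ∧ k < k + (t :: l).length ∧ (k : Int) ≠ i ∧ ((t :: l).getD (k - k) []).contains x then (1:Int) else 0) = 1 := by
          rw [if_pos]
          refine ⟨le_refl _, by simp, hne, ?_⟩
          rw [Nat.sub_self, List.getD_cons_zero]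
          simpa [PySem.Set.contains] using hmem
        have h2 : (if k + 1 ≤ k ∧ k < k + 1 + l.length ∧ (k : Int) ≠ i ∧ (l.getD (k - (k+1)) []).contains x then (1:Int) else 0) = 0 := by
          rw [if_neg]; omega
        rw [h1, h2]; ring
      · rw [List.getD_eq_getElem?_getD, List.getElem?_set_ne (by omega), ← List.getD_eq_getElem?_getD]
        congr 1
        by_cases hko : o + 1 ≤ k
        · have hsub : k - o = (k - (o+1)) + 1 := by omega
          rw [hsub, List.getD_cons_succ, harith]
          apply if_congr _ rfl rfl
          constructor
          · rintro ⟨-, h⟩; exact h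
          · intro h; exact ⟨hk, h⟩
        · rw [if_neg (by omega), if_neg (by omega)]
    · rw [if_neg hc]
      rw [ih (o+1) _ (by omega) k]
      congr 1
      by_cases hk : k = o
      · subst hk
        rw [if_neg (by omega), if_neg ?_]
        rintro ⟨-, -, h3, h4⟩
        refine hc ⟨h3, ?_⟩
        rw [Nat.sub_self, List.getD_cons_zero] at h4
        simpa [PySem.Set.contains] using h4
      · by_cases hko : o + 1 ≤ k
        · have hsub : k - o = (k - (o+1)) + 1 := by omega
          rw [hsub, List.getD_cons_succ, harith]
          apply if_congr _ rfl rfl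
          constructor
          · rintro ⟨-, h⟩; exact h
          · intro h; exact ⟨hk, h⟩
        · rw [if_neg (by omega), if_neg (by omega)]

theorem innerB_length (i x : Int) (l : List (List Int)) :
    ∀ (o : Int) (cnt : List Int),
    ((PySem.List.enumerate l o).foldl (fun cnt jt =>
        if jt.1 ≠ i ∧ PySem.Set.contains jt.2 x then
          PySem.List.pySetD cnt jt.1 (PySem.List.pyGetD cnt jt.1 0 + 1)
        else cnt) cnt).length = cnt.length := by
  induction l with
  | nil => intro o cnt; simp [PySem.List.enumerate]
  | cons t l ih =>
    intro o cnt
    rw [PySem.List.enumerate_cons, List.foldl_cons, ih]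
    by_cases hc : (o ≠ i ∧ PySem.Set.contains t x)
    · rw [if_pos hc, PySem.List.length_pySetD]
    · rw [if_neg hc]

theorem midB_getD (i : Int) (sets : List (List Int)) (xs : List Int) :
    ∀ (cnt : List Int), sets.length ≤ cnt.length →
    ∀ k : Nat,
    (xs.foldl (fun cnt x =>
        (PySem.List.enumerate sets (0 : Int)).foldl (fun cnt jt =>
          if jt.1 ≠ i ∧ PySem.Set.contains jt.2 x then
            PySem.List.pySetD cnt jt.1 (PySem.List.pyGetD cnt jt.1 0 + 1)
          else cnt) cnt) cnt).getD k 0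
      = cnt.getD k 0 +
        (if k < sets.length then
          ((xs.countP (fun x => decide ((k : Int) ≠ i ∧ (sets.getD k []).contains x = true)) : Nat) : Int)
         else 0) := by
  induction xs with
  | nil => intro cnt _ k; simp
  | cons x xs ih =>
    intro cnt hlen k
    rw [List.foldl_cons]
    rw [ih _ (by rw [innerB_length]; omega) k]
    have hinner := innerB_getD i x sets 0 cnt (by omega) k
    simp only [Nat.cast_zero, Nat.zero_le, Nat.zero_add, Nat.sub_zero, true_and] at hinner
    rw [hinner]
    rw [List.countP_cons]
    have hbr : (decide ((k : Int) ≠ i ∧ (sets.getD k []).contains x = true) = true)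
        ↔ ((k : Int) ≠ i ∧ (sets.getD k []).contains x = true) := by
      simp
    split_ifs with h1 h2 h3 h4 h5 <;> push_cast
    · ring
    · exact absurd h1.2 (by simpa using h3)
    · exact absurd h1.1 h2
    · exact absurd ⟨h4, by simpa using h5⟩ h1
    · ring
    · ring

theorem midB_length (i : Int) (sets : List (List Int)) (xs : List Int) :
    ∀ (cnt : List Int),
    (xs.foldl (fun cnt x =>
        (PySem.List.enumerate sets (0 : Int)).foldl (fun cnt jt =>
          if jt.1 ≠ i ∧ PySem.Set.contains jt.2 x then
            PySem.List.pySetD cnt jt.1 (PySem.List.pyGetD cnt jt.1 0 + 1)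
          else cnt) cnt) cnt).length = cnt.length := by
  induction xs with
  | nil => intro cnt; simp
  | cons x xs ih => intro cnt; rw [List.foldl_cons, ih, innerB_length]

theorem maxD0_eq_foldl (l : List Int) (h : ∀ y ∈ l, 0 ≤ y) :
    (PySem.List.max? l (fun y => y)).getD 0 = l.foldl max 0 := by
  cases l with
  | nil => simp [PySem.List.max?]
  | cons x t =>
    rw [PySem.List.max?_id_cons, Option.getD_some, List.foldl_cons,
        max_eq_right (h x (by simp))]

theorem cnt_eq_map (sets : List (List Int)) (i₀ : Nat) :
    ((PySem.Set.ofList (sets.getD i₀ [])).foldl (fun cnt x =>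
        (PySem.List.enumerate sets (0 : Int)).foldl (fun cnt jt =>
          if jt.1 ≠ (i₀ : Int) ∧ PySem.Set.contains jt.2 x then
            PySem.List.pySetD cnt jt.1 (PySem.List.pyGetD cnt jt.1 0 + 1)
          else cnt) cnt) (List.replicate sets.length 0))
      = (List.range sets.length).map (fun (k : Nat) =>
          (((PySem.Set.ofList (sets.getD i₀ [])).countP
            (fun x => decide ((k : Int) ≠ (i₀ : Int) ∧ (sets.getD k []).contains x = true)) : Nat) : Int)) := by
  apply List.ext_getElem
  · rw [midB_length]; simp
  · intro k hk1 hk2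
    have hk : k < sets.length := by simpa using hk2
    have hg := midB_getD (i₀ : Int) sets (PySem.Set.ofList (sets.getD i₀ []))
      (List.replicate sets.length 0) (by simp) k
    rw [if_pos hk] at hg
    rw [← List.getD_eq_getElem _ 0, hg]
    simp [hk]

theorem countP_eq_gval (sets : List (List Int)) (i₀ k : Nat) (hi : i₀ < sets.length) :
    (((PySem.Set.ofList (sets.getD i₀ [])).countP
        (fun x => decide ((k : Int) ≠ (i₀ : Int) ∧ (sets.getD k []).contains x = true)) : Nat) : Int)
      = gval sets i₀ k := by
  by_cases hk : k = i₀
  · subst hk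
    rw [gval, if_neg (by simp)]
    norm_cast
    rw [List.countP_eq_zero]
    intro x hx
    simp
  · have hne : ((k : Int)) ≠ (i₀ : Int) := by exact_mod_cast hk
    rw [gval, if_pos (by omega), glen, PySem.Set.len, PySem.Set.inter]
    have heq : List.countP
        (fun x => decide ((k : Int) ≠ (i₀ : Int) ∧ (sets.getD k []).contains x = true))
        (PySem.Set.ofList (sets.getD i₀ []))
        = (List.filter (fun x => (sets.getD k []).contains x) (PySem.Set.ofList (sets.getD i₀ []))).length := by
      rw [List.countP_eq_length_filter]
      congr 1
      apply List.filter_congr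
      intro x hx
      simp [hne]
    rw [heq]
    simp [PySem.Set.contains]

theorem rowBest_spec (sets : List (List Int)) (i₀ : Nat) (hi : i₀ < sets.length) :
    rowBest (i₀ : Int) (sets.getD i₀ []) sets = rowSpec sets i₀ := by
  rw [rowBest]
  rw [cnt_eq_map sets i₀]
  rw [maxD0_eq_foldl _ (by intro y hy; simp at hy; obtain ⟨a, -, rfl⟩ := hy; positivity)]
  rw [rowSpec]
  congr 1
  apply List.map_congr_left
  intro k hk
  exact countP_eq_gval sets i₀ k hi

theorem portB_eq_spec (sets : List (List Int)) :
    count_common_elements_alt sets = (List.range sets.length).map (rowSpec sets) := by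
  apply List.ext_getElem
  · simp [count_common_elements_alt, PySem.List.length_enumerate]
  · intro k hk1 hk2
    have hk : k < sets.length := by simpa using hk2
    simp only [count_common_elements_alt]
    rw [List.getElem_map, PySem.List.getElem_enumerate]
    rw [List.getElem_map, List.getElem_range]
    have : sets[k] = sets.getD k [] := by rw [List.getD_eq_getElem _ _ hk]
    simp only [zero_add, this]
    exact rowBest_spec sets k hk

theorem innerA (f : Int → Int) (i₀ : Nat) :
    ∀ (L : List Int) (res : List Int), i₀ < res.length →
    L.foldl (fun res j =>
        if (i₀ : Int) ≠ j then
          PySem.List.pySetD res (i₀ : Int) (max (PySem.List.pyGetD res (i₀ : Int) 0) (f j))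
        else res) res
      = PySem.List.pySetD res (i₀ : Int)
          (L.foldl (fun m j => if (i₀ : Int) ≠ j then max m (f j) else m)
            (PySem.List.pyGetD res (i₀ : Int) 0)) := by
  intro L
  induction L with
  | nil =>
    intro res hlen
    simp only [List.foldl_nil]
    rw [PySem.List.pySetD_natCast, PySem.List.pyGetD_natCast,
        List.getD_eq_getElem _ _ hlen, List.set_getElem_self]
  | cons j L ih =>
    intro res hlen
    simp only [List.foldl_cons]
    by_cases hc : (i₀ : Int) ≠ j
    · rw [if_pos hc, if_pos hc]
      rw [ih _ (by rw [PySem.List.length_pySetD]; exact hlen)]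
      rw [PySem.List.pyGetD_pySetD_natCast _ _ _ _ _ hlen, if_pos rfl]
      rw [PySem.List.pySetD_natCast, PySem.List.pySetD_natCast, PySem.List.pySetD_natCast,
          List.set_set]
    · rw [if_neg hc, if_neg hc, ih _ hlen]

theorem outerA (f : Int → Int → Int) (n : Nat) :
    ∀ (L : List Int) (res : List Int), res.length = n → L.Nodup →
    (∀ i ∈ L, ∃ i₀ : Nat, i = (i₀ : Int) ∧ i₀ < n) →
    (∀ i ∈ L, PySem.List.pyGetD res i 0 = 0) →
    (L.foldl (fun res i =>
        (PySem.List.pyRange 0 (n : Int) 1).foldl (fun res j =>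
          if i ≠ j then
            PySem.List.pySetD res i (max (PySem.List.pyGetD res i 0) (f i j))
          else res) res) res).length = n ∧
    ∀ k : Nat, PySem.List.pyGetD (L.foldl (fun res i =>
        (PySem.List.pyRange 0 (n : Int) 1).foldl (fun res j =>
          if i ≠ j then
            PySem.List.pySetD res i (max (PySem.List.pyGetD res i 0) (f i j))
          else res) res) res) (k : Int) 0
      = if (k : Int) ∈ L then
          (PySem.List.pyRange 0 (n : Int) 1).foldl (fun m j => if (k : Int) ≠ j then max m (f (k : Int) j) else m) 0
        else PySem.List.pyGetD res (k : Int) 0 := by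
  intro L
  induction L with
  | nil => intro res hlen _ _ _; simp [hlen]
  | cons i L ih =>
    intro res hlen hnd hmem h0
    obtain ⟨i₀, rfl, hi₀⟩ := hmem i (by simp)
    simp only [List.foldl_cons]
    have hres' : (PySem.List.pyRange 0 (n : Int) 1).foldl (fun res j =>
          if (i₀ : Int) ≠ j then
            PySem.List.pySetD res (i₀ : Int) (max (PySem.List.pyGetD res (i₀ : Int) 0) (f (i₀ : Int) j))
          else res) res
        = PySem.List.pySetD res (i₀ : Int)
            ((PySem.List.pyRange 0 (n : Int) 1).foldl
              (fun m j => if (i₀ : Int) ≠ j then max m (f (i₀ : Int) j) else m) 0) := by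
      rw [innerA (f (i₀ : Int)) i₀ _ res (by omega)]
      rw [h0 _ (by simp)]
    rw [hres']
    have hlen' : (PySem.List.pySetD res (i₀ : Int)
        ((PySem.List.pyRange 0 (n : Int) 1).foldl
          (fun m j => if (i₀ : Int) ≠ j then max m (f (i₀ : Int) j) else m) 0)).length = n := by
      rw [PySem.List.length_pySetD]; exact hlen
    have hget' : ∀ k : Nat, PySem.List.pyGetD (PySem.List.pySetD res (i₀ : Int) ((PySem.List.pyRange 0 (n : Int) 1).foldl (fun m j => if (i₀ : Int) ≠ j then max m (f (i₀ : Int) j) else m) 0)) (k : Int) 0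
        = if ((k : Int)) = (i₀ : Int) then ((PySem.List.pyRange 0 (n : Int) 1).foldl (fun m j => if (i₀ : Int) ≠ j then max m (f (i₀ : Int) j) else m) 0) else PySem.List.pyGetD res (k : Int) 0 := by
      intro k
      rw [PySem.List.pyGetD_pySetD_natCast _ _ _ _ _ (by omega)]
      simp [Nat.cast_inj]
    obtain ⟨ihlen, ihget⟩ := ih _ hlen' (hnd.of_cons)
      (fun i hi => hmem i (by simp [hi]))
      (fun i hi => by
        obtain ⟨j₀, rfl, -⟩ := hmem i (by simp [hi])
        rw [hget', if_neg]
        · exact h0 _ (by simp [hi])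
        · intro hji
          rw [hji] at hi
          exact (List.nodup_cons.mp hnd).1 hi)
    refine ⟨ihlen, fun k => ?_⟩
    rw [ihget k]
    by_cases hkL : ((k : Nat) : Int) ∈ L
    · rw [if_pos hkL, if_pos (by simp [hkL])]
    · rw [if_neg hkL, hget']
      by_cases hki : ((k : Nat) : Int) = (i₀ : Int)
      · rw [if_pos hki, if_pos (by simp [hki]), hki]
      · rw [if_neg hki, if_neg (by simp [hki, hkL])]

theorem foldl_if_max (k : Nat) (u : Nat → Int) :
    ∀ (L : List Nat) (m : Int), 0 ≤ m →
    L.foldl (fun (m : Int) (t : Nat) => if (k : Int) ≠ (t : Int) then max m (u t) else m) m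
      = L.foldl (fun (m : Int) (t : Nat) => max m (if k ≠ t then u t else 0)) m := by
  intro L
  induction L with
  | nil => intro m _; rfl
  | cons t L ih =>
    intro m hm
    simp only [List.foldl_cons]
    by_cases ht : k = t
    · subst ht
      rw [if_neg (by simp), if_neg (by simp), max_eq_left hm]
      exact ih m hm
    · rw [if_pos (by exact_mod_cast ht), if_pos ht]
      exact ih _ (le_trans hm (le_max_left _ _))

theorem rowA_eq (sets : List (List Int)) (k : Nat) :
    (PySem.List.pyRange 0 (sets.length : Int) 1).foldl (fun m j =>
        if (k : Int) ≠ j then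
          max m (PySem.Set.len (PySem.Set.inter
            (PySem.Set.ofList (PySem.List.pyGetD sets (k : Int) []))
            (PySem.List.pyGetD sets j [])))
        else m) 0
      = rowSpec sets k := by
  rw [PySem.List.pyRange_one]
  have h1 : ((sets.length : Int) - 0).toNat = sets.length := by omega
  rw [h1, List.foldl_map]
  simp only [zero_add]
  have h2 : ∀ (t : Nat), (PySem.Set.len (PySem.Set.inter
      (PySem.Set.ofList (PySem.List.pyGetD sets (k : Int) []))
      (PySem.List.pyGetD sets (t : Int) []))) = glen sets k t := by
    intro t
    rw [glen, PySem.List.pyGetD_natCast, PySem.List.pyGetD_natCast]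
  simp only [h2]
  have h3 := foldl_if_max k (fun t => glen sets k t) (List.range sets.length) 0 le_rfl
  rw [h3]
  rw [rowSpec, List.foldl_map]
  rfl

theorem portA_eq_spec (sets : List (List Int)) :
    count_common_elements sets = (List.range sets.length).map (rowSpec sets) := by
  obtain ⟨hl, hg⟩ := outerA
    (fun i j => PySem.Set.len (PySem.Set.inter
      (PySem.Set.ofList (PySem.List.pyGetD sets i []))
      (PySem.List.pyGetD sets j [])))
    sets.length
    (PySem.List.pyRange 0 (sets.length : Int) 1)
    (List.replicate sets.length 0)
    (by simp)
    (PySem.List.nodup_pyRange_one 0 _)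
    (fun i hi => by
      rw [PySem.List.mem_pyRange_one] at hi
      exact ⟨i.toNat, by omega, by omega⟩)
    (fun i hi => by
      rw [PySem.List.mem_pyRange_one] at hi
      rw [PySem.List.pyGetD_eq_getElem _ 0 (by omega) (by simpa using hi.2)]
      simp)
  apply List.ext_getElem
  · rw [List.length_map, List.length_range]
    exact hl
  · intro k hk1 hk2
    have hk : k < sets.length := by simpa using hk2
    rw [List.getElem_map, List.getElem_range]
    have hitonat : ((k : Int)).toNat = k := by omega
    have hlen0 : ((k : Int)) < ((count_common_elements sets).length : Int) := by
      exact_mod_cast hk1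
    have hL : PySem.List.pyGetD (count_common_elements sets) (k : Int) 0
        = (count_common_elements sets)[k]'hk1 := by
      rw [PySem.List.pyGetD_eq_getElem _ 0 (by omega) hlen0]
      simp only [hitonat]
    calc (count_common_elements sets)[k]'hk1
        = PySem.List.pyGetD (count_common_elements sets) (k : Int) 0 := hL.symm
      _ = (PySem.List.pyRange 0 (sets.length : Int) 1).foldl (fun m j =>
            if (k : Int) ≠ j then
              max m (PySem.Set.len (PySem.Set.inter
                (PySem.Set.ofList (PySem.List.pyGetD sets (k : Int) []))
                (PySem.List.pyGetD sets j [])))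
            else m) 0 := by
          have h := hg k
          rw [if_pos (by rw [PySem.List.mem_pyRange_one]; omega)] at h
          exact h
      _ = rowSpec sets k := rowA_eq sets k

-- ===== VERDICT (by name: the statement is the Claim_ definition above) =====
theorem count_common_elements_spec : Claim_equal_count_common_elements := by
  intro sets _
  unfold Spec_count_common_elements
  rw [portA_eq_spec, portB_eq_spec]
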